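-- pv_equiv track=rewrite | github.com/Luigian/Tictactoe | tictactoe/tictactoe.py | moves_counter
-- ===== SOURCE A (Python) =====
-- def moves_counter(board):
--     """
--     """
--     count = {"x": 0, "o": 0, "empty": 0}
--
--     for row in board:
--         for move in row:
--             if move == "X":
--                 count["x"] += 1
--             elif move == "O":
--                 count["o"] += 1
--             else:
--                 count["empty"] += 1
--     return count
-- ===== SOURCE B (Python) =====
-- def moves_counter(board):
--     total = sum(len(row) for row in board)
--     x = sum(1 for row in board for move in row if move == "X")
--     o = sum(1 for row in board for move in row if move == "O")
--     return {"x": x, "o": o, "empty": total - x - o}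
-- ===== Notes on version B (the rewrite author's own statement) =====
-- stated objective: simpler
-- what changed: Replaces the per-cell three-way branching dict-update loop with independent generator-sum counts of X and O plus a total, deriving empty by subtraction.
import Mathlib
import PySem

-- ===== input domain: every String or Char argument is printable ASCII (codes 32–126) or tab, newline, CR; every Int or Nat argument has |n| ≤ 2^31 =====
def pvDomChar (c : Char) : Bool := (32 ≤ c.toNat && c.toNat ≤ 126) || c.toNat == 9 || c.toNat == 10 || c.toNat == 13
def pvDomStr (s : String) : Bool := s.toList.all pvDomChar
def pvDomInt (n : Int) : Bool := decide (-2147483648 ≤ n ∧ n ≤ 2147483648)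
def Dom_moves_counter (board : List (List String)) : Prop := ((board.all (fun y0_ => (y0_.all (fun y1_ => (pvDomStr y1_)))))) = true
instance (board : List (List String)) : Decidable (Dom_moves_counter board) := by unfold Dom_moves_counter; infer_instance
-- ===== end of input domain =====

-- B replaces the per-cell three-way dict-update loop by independent sums for X, O and total, deriving empty by subtraction (same cost, simpler decomposition).


-- ===== PORT A =====
-- count["x"] += 1 on an always-present key; Dict.modify with default 0 is exact here.
def moves_counter (board : List (List String)) : List (String × Int) :=
  let count : PySem.Dict String Int := PySem.Dict.ofList [("x", 0), ("o", 0), ("empty", 0)]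
  (board.foldl (fun c row => row.foldl (fun c move =>
      if move == "X" then c.modify "x" 0 (· + 1)
      else if move == "O" then c.modify "o" 0 (· + 1)
      else c.modify "empty" 0 (· + 1)) c) count).items

-- ===== PORT B =====
def moves_counter_alt (board : List (List String)) : List (String × Int) :=
  let total : Int := (board.map (fun row => (row.length : Int))).sum
  let x : Int := (board.flatMap (fun row => (row.filter (fun move => move == "X")).map (fun _ => (1 : Int)))).sum
  let o : Int := (board.flatMap (fun row => (row.filter (fun move => move == "O")).map (fun _ => (1 : Int)))).sum
  [("x", x), ("o", o), ("empty", total - x - o)]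

-- ===== PRECONDITION & SPEC =====
def Spec_moves_counter (board : List (List String)) (out : List (String × Int)) : Prop := out = moves_counter_alt board
instance (board : List (List String)) (out : List (String × Int)) : Decidable (Spec_moves_counter board out) := by unfold Spec_moves_counter; infer_instance

-- ===== CLAIM (what is proved, stated in full; the proofs are below) =====
def Claim_equal_moves_counter : Prop := ∀ (board : List (List String)), Dom_moves_counter board → Spec_moves_counter board (moves_counter board)

-- ===== LEMMAS AND PROOFS =====

def cellStep (c : PySem.Dict String Int) (move : String) : PySem.Dict String Int :=
  if move == "X" then c.modify "x" 0 (· + 1)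
  else if move == "O" then c.modify "o" 0 (· + 1)
  else c.modify "empty" 0 (· + 1)

lemma cellStep_lit (a b e : Int) (m : String) :
    cellStep (PySem.Dict.mk [("x", a), ("o", b), ("empty", e)]) m =
      PySem.Dict.mk [("x", a + (if m == "X" then 1 else 0)),
                     ("o", b + (if m == "O" then 1 else 0)),
                     ("empty", e + (if m == "X" || m == "O" then 0 else 1))] := by
  by_cases hx : m = "X"
  · subst hx; simp [cellStep]; rfl
  · by_cases ho : m = "O"
    · subst ho; simp [cellStep]; rfl
    · simp [cellStep, hx, ho]; rfl

lemma row_fold (row : List String) (a b e : Int) :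
    row.foldl cellStep (PySem.Dict.mk [("x", a), ("o", b), ("empty", e)]) =
      PySem.Dict.mk [("x", a + ((row.filter (fun m => m == "X")).map (fun _ => (1 : Int))).sum),
                     ("o", b + ((row.filter (fun m => m == "O")).map (fun _ => (1 : Int))).sum),
                     ("empty", e + (row.length : Int)
                        - ((row.filter (fun m => m == "X")).map (fun _ => (1 : Int))).sum
                        - ((row.filter (fun m => m == "O")).map (fun _ => (1 : Int))).sum)] := by
  induction row generalizing a b e with
  | nil => simp
  | cons m row ih =>
    simp only [List.foldl_cons, cellStep_lit, ih, List.filter_cons, List.length_cons]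
    by_cases hx : m = "X" <;> by_cases ho : m = "O" <;>
      simp_all [PySem.Dict.mk.injEq] <;> omega

lemma board_fold (board : List (List String)) (a b e : Int) :
    board.foldl (fun c row => row.foldl cellStep c) (PySem.Dict.mk [("x", a), ("o", b), ("empty", e)]) =
      PySem.Dict.mk [("x", a + (board.flatMap (fun row => (row.filter (fun m => m == "X")).map (fun _ => (1 : Int)))).sum),
                     ("o", b + (board.flatMap (fun row => (row.filter (fun m => m == "O")).map (fun _ => (1 : Int)))).sum),
                     ("empty", e + (board.map (fun row => (row.length : Int))).sum
                        - (board.flatMap (fun row => (row.filter (fun m => m == "X")).map (fun _ => (1 : Int)))).sum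
                        - (board.flatMap (fun row => (row.filter (fun m => m == "O")).map (fun _ => (1 : Int)))).sum)] := by
  induction board generalizing a b e with
  | nil => simp
  | cons row board ih =>
    simp only [List.foldl_cons, row_fold, ih, List.flatMap_cons, List.map_cons, List.sum_append,
      List.sum_cons, PySem.Dict.mk.injEq, List.cons.injEq, Prod.mk.injEq, and_true, true_and]
    refine ⟨by ring, by ring, by ring⟩

-- ===== VERDICT (by name: the statement is the Claim_ definition above) =====
theorem moves_counter_spec : Claim_equal_moves_counter := by
  intro board _
  show moves_counter board = moves_counter_alt board
  unfold moves_counter moves_counter_alt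
  have : (fun (c : PySem.Dict String Int) (row : List String) => row.foldl (fun c move =>
      if move == "X" then c.modify "x" 0 (· + 1)
      else if move == "O" then c.modify "o" 0 (· + 1)
      else c.modify "empty" 0 (· + 1)) c) = (fun c row => row.foldl cellStep c) := rfl
  rw [this]
  show (board.foldl _ (PySem.Dict.mk [("x", 0), ("o", 0), ("empty", 0)])).items = _
  rw [board_fold]
  simp
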